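-- pv_equiv track=rewrite | github.com/mic006016/seoul-commercial-district-analysis | fastapi_server/app/routes/status.py | prev_quarter
-- ===== SOURCE A (Python) =====
-- def prev_quarter(yqc: int, n: int = 1) -> int:
--     """yqc=YYYYQ 형태(예: 20244)에서 n분기 이전 코드 반환"""
--     year = yqc // 10
--     q = yqc % 10
--     for _ in range(n):
--         if q > 1:
--             q -= 1
--         else:
--             year -= 1
--             q = 4
--     return year * 10 + q
-- ===== SOURCE B (Python) =====
-- def prev_quarter(yqc: int, n: int = 1) -> int:
--     """yqc=YYYYQ 형태(예: 20244)에서 n분기 이전 코드 반환 — closed form on the linear quarter index."""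
--     if n <= 0:
--         return yqc
--     year, q = divmod(yqc, 10)
--     y2, q2 = divmod(4 * year + max(q, 1) - 1 - n, 4)
--     return y2 * 10 + q2 + 1
-- ===== Notes on version B (the rewrite author's own statement) =====
-- stated objective: faster
-- what changed: Replaced the n-iteration decrement loop by an O(1) closed form: convert (year, quarter) to a linear quarter index, subtract n, and decompose back with divmod by 4.
-- intended difference: When the quarter digit exceeds 4 (yqc%10 > 4) and n < yqc%10 - 4, A returns a code whose quarter digit still exceeds 4 (e.g. A(20249,1)=20248), while B (e.g. 20254) carries into the year and always returns a code with quarter digit 1..4, the intended shape of a YYYYQ code. — e.g. on prev_quarter(20249, 1): A returns 20248, B returns 20254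
import Mathlib
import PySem

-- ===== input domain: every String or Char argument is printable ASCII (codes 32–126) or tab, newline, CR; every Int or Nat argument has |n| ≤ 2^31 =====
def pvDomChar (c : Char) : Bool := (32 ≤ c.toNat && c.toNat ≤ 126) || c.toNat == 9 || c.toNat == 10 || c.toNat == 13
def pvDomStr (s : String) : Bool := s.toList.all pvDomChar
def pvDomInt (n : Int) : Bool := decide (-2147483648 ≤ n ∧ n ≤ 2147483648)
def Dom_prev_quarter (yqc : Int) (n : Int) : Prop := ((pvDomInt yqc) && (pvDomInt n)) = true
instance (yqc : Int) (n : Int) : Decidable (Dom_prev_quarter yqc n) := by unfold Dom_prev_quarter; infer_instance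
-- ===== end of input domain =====

-- B replaces A's n-step decrement loop by a closed form on the linear quarter index
-- (4*year + quarter - 1), subtracting n and decomposing back with divmod by 4.

-- ===== PORT A =====
def prev_quarter (yqc : Int) (n : Int) : Int :=
  let year := PySem.Int.floordiv yqc 10
  let q := PySem.Int.mod yqc 10
  let s := (PySem.List.pyRange 0 n 1).foldl
      (fun (s : Int × Int) _ => if s.2 > 1 then (s.1, s.2 - 1) else (s.1 - 1, (4 : Int)))
      (year, q)
  s.1 * 10 + s.2

-- ===== PORT B =====
def prev_quarter_alt (yqc : Int) (n : Int) : Int :=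
  if n ≤ 0 then yqc
  else
    let year := PySem.Int.floordiv yqc 10
    let q := PySem.Int.mod yqc 10
    let idx := 4 * year + max q 1 - 1 - n
    (PySem.Int.floordiv idx 4) * 10 + PySem.Int.mod idx 4 + 1

-- ===== PRECONDITION & SPEC =====
-- When the quarter digit exceeds 4 (yqc%10 > 4) and n < yqc%10 - 4, A returns a code whose
-- quarter digit still exceeds 4, while B carries into the year and always returns a code with
-- quarter digit 1..4, the intended shape of a YYYYQ code.
def D_prev_quarter (yqc : Int) (n : Int) : Prop :=
  1 ≤ n ∧ 4 < PySem.Int.mod yqc 10 ∧ n < PySem.Int.mod yqc 10 - 4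
instance (yqc : Int) (n : Int) : Decidable (D_prev_quarter yqc n) := by
  unfold D_prev_quarter; infer_instance

def Spec_prev_quarter (yqc : Int) (n : Int) (out : Int) : Prop :=
  ¬ D_prev_quarter yqc n → out = prev_quarter_alt yqc n
instance (yqc : Int) (n : Int) (out : Int) : Decidable (Spec_prev_quarter yqc n out) := by
  unfold Spec_prev_quarter; infer_instance

def pvDiffWitness_prev_quarter : Int × Int := (20249, 1)
def pvDiffWitnessOut_prev_quarter : Int × Int := (20248, 20254)

-- ===== CLAIM (what is proved, stated in full; the proofs are below) =====
def Claim_unchanged_prev_quarter : Prop := ∀ (yqc : Int) (n : Int), Dom_prev_quarter yqc n → Spec_prev_quarter yqc n (prev_quarter yqc n)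
def Claim_changed_prev_quarter : Prop := Dom_prev_quarter (pvDiffWitness_prev_quarter.1) (pvDiffWitness_prev_quarter.2) ∧ D_prev_quarter (pvDiffWitness_prev_quarter.1) (pvDiffWitness_prev_quarter.2) ∧ prev_quarter (pvDiffWitness_prev_quarter.1) (pvDiffWitness_prev_quarter.2) = pvDiffWitnessOut_prev_quarter.1 ∧ prev_quarter_alt (pvDiffWitness_prev_quarter.1) (pvDiffWitness_prev_quarter.2) = pvDiffWitnessOut_prev_quarter.2 ∧ pvDiffWitnessOut_prev_quarter.1 ≠ pvDiffWitnessOut_prev_quarter.2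
def Claim_exact_prev_quarter : Prop := ∀ (yqc : Int) (n : Int), Dom_prev_quarter yqc n → D_prev_quarter yqc n → prev_quarter yqc n ≠ prev_quarter_alt yqc n

-- ===== LEMMAS AND PROOFS =====

-- A's loop body (element-independent), as a function of the (year, quarter) state.
def pvStep (s : Int × Int) : Int × Int :=
  if s.2 > 1 then (s.1, s.2 - 1) else (s.1 - 1, (4 : Int))

lemma pv_foldl_const (l : List Int) (s : Int × Int) :
    l.foldl (fun (s : Int × Int) _ => pvStep s) s = pvStep^[l.length] s := by
  induction l generalizing s with
  | nil => rfl
  | cons a t ih => simp [List.foldl_cons, ih, Function.iterate_succ_apply]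

-- Loop invariant: starting from quarter q ≥ 1, after k ≥ 1 steps the quarter is in 1..4
-- (provided q ≤ 4 or k ≥ q - 4) and the linear index 4*year + quarter has dropped by k.
lemma pv_loop (k : Nat) (y q : Int) (hq : 1 ≤ q) (hk : 1 ≤ k)
    (h : q ≤ 4 ∨ q - 4 ≤ (k : Int)) :
    1 ≤ (pvStep^[k] (y, q)).2 ∧ (pvStep^[k] (y, q)).2 ≤ 4 ∧
      4 * (pvStep^[k] (y, q)).1 + (pvStep^[k] (y, q)).2 = 4 * y + q - (k : Int) := by
  revert hq hk h
  induction k generalizing y q with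
  | zero => intro hq hk h; omega
  | succ k ih =>
    intro hq hk h
    rw [Function.iterate_succ_apply]
    by_cases h1 : q > 1
    · have hs : pvStep (y, q) = (y, q - 1) := by simp [pvStep, h1]
      rw [hs]
      by_cases hk0 : k = 0
      · subst hk0; simp only [Function.iterate_zero, id_eq]; norm_num; omega
      · have := ih y (q - 1) (by omega) (by omega) (by omega)
        push_cast at *; omega
    · have hs : pvStep (y, q) = (y - 1, 4) := by simp [pvStep, h1]
      rw [hs]
      by_cases hk0 : k = 0
      · subst hk0; simp only [Function.iterate_zero, id_eq]; norm_num; omega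
      · have := ih (y - 1) 4 (by omega) (by omega) (by omega)
        push_cast at *; omega

-- When the quarter stays above 4, each step is a plain decrement.
lemma pv_loop_big (k : Nat) (y q : Int) (h : (k : Int) < q - 1) :
    pvStep^[k] (y, q) = (y, q - (k : Int)) := by
  induction k generalizing y q with
  | zero => simp
  | succ k ih =>
    rw [Function.iterate_succ_apply]
    have hs : pvStep (y, q) = (y, q - 1) := by
      have : q > 1 := by push_cast at h; omega
      simp [pvStep, this]
    rw [hs, ih y (q - 1) (by push_cast at *; omega)]
    push_cast; ring_nf

-- From quarter digit 0 the first step acts exactly as from quarter 1.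
lemma pv_q_zero (k : Nat) (hk : 1 ≤ k) (y : Int) :
    pvStep^[k] (y, 0) = pvStep^[k] (y, 1) := by
  obtain ⟨j, rfl⟩ : ∃ j : Nat, k = j + 1 := ⟨k - 1, by omega⟩
  rw [Function.iterate_succ_apply, Function.iterate_succ_apply,
      show pvStep (y, 0) = (y - 1, 4) from by simp [pvStep],
      show pvStep (y, 1) = (y - 1, 4) from by simp [pvStep]]

lemma pv_decode (idx y' q' : Int) (h : idx = 4 * y' + q' - 1) (h1 : 1 ≤ q') (h4 : q' ≤ 4) :
    PySem.Int.floordiv idx 4 = y' ∧ PySem.Int.mod idx 4 = q' - 1 := by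
  have hd := PySem.Int.floordiv_mul_add_mod idx 4
  have hm0 := PySem.Int.mod_nonneg idx (b := 4) (by omega)
  have hm4 := PySem.Int.mod_lt idx (b := 4) (by omega)
  omega

lemma pv_mod_bounds (yqc : Int) : 0 ≤ PySem.Int.mod yqc 10 ∧ PySem.Int.mod yqc 10 < 10 :=
  ⟨PySem.Int.mod_nonneg yqc (by omega), PySem.Int.mod_lt yqc (by omega)⟩

-- ===== VERDICT (by name: the statement is the Claim_ definition above) =====
theorem prev_quarter_spec : Claim_unchanged_prev_quarter := by
  intro yqc n _ hD
  simp only [prev_quarter, prev_quarter_alt]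
  have hq := pv_mod_bounds yqc
  set year := PySem.Int.floordiv yqc 10 with hyear
  set q := PySem.Int.mod yqc 10 with hqdef
  by_cases hn : n ≤ 0
  · rw [PySem.List.pyRange_one_eq_nil (by omega)]
    have := PySem.Int.floordiv_mul_add_mod yqc 10
    simp only [List.foldl_nil, if_pos hn]
    omega
  · -- n ≥ 1; ¬D gives max q 1 ≤ 4 ∨ n ≥ max q 1 - 4, and digit 0 starts like digit 1
    unfold D_prev_quarter at hD
    push Not at hD
    have hn1 : 1 ≤ n := by omega
    have hcase : max q 1 ≤ 4 ∨ max q 1 - 4 ≤ n := by omega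
    rw [show (fun (s : Int × Int) _ => if s.2 > 1 then (s.1, s.2 - 1) else (s.1 - 1, (4 : Int)))
          = (fun (s : Int × Int) (_ : Int) => pvStep s) from rfl,
        pv_foldl_const, PySem.List.length_pyRange_one,
        show n - 0 = n from by ring]
    have hlen : (n.toNat : Int) = n := by omega
    have hnorm : pvStep^[n.toNat] (year, q) = pvStep^[n.toNat] (year, max q 1) := by
      rcases eq_or_lt_of_le hq.1 with h0 | h0
      · rw [← h0, show max (0 : Int) 1 = 1 from by omega]
        exact pv_q_zero n.toNat (by omega) year
      · rw [show max q 1 = q from by omega]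
    have := pv_loop n.toNat year (max q 1) (by omega) (by omega) (by omega)
    rw [hlen, ← hnorm] at this
    obtain ⟨h1, h4, hlin⟩ := this
    have hdec := pv_decode (4 * year + max q 1 - 1 - n) (pvStep^[n.toNat] (year, q)).1
      (pvStep^[n.toNat] (year, q)).2 (by omega) h1 h4
    rw [if_neg hn]
    omega

theorem prev_quarter_changed : Claim_changed_prev_quarter := by
  unfold Claim_changed_prev_quarter; decide

theorem prev_quarter_tight : Claim_exact_prev_quarter := by
  intro yqc n _ hD
  obtain ⟨hn1, hq4, hnq⟩ := hD
  have hq := pv_mod_bounds yqc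
  simp only [prev_quarter, prev_quarter_alt]
  set year := PySem.Int.floordiv yqc 10 with hyear
  set q := PySem.Int.mod yqc 10 with hqdef
  rw [show (fun (s : Int × Int) _ => if s.2 > 1 then (s.1, s.2 - 1) else (s.1 - 1, (4 : Int)))
        = (fun (s : Int × Int) (_ : Int) => pvStep s) from rfl,
      pv_foldl_const, PySem.List.length_pyRange_one,
      show n - 0 = n from by ring]
  have hlen : (n.toNat : Int) = n := by omega
  have hmax : max q 1 = q := by omega
  have hd := PySem.Int.floordiv_mul_add_mod (4 * year + q - 1 - n) 4
  have hm0 := PySem.Int.mod_nonneg (4 * year + q - 1 - n) (b := 4) (by omega)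
  have hm4 := PySem.Int.mod_lt (4 * year + q - 1 - n) (b := 4) (by omega)
  simp only [show ¬ n ≤ 0 from by omega, if_false]
  -- the loop only decrements q, so the final quarter digit stays above 4
  rw [pv_loop_big n.toNat year q (by omega), hlen, hmax]
  intro hcon; omega
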